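-- pv_equiv track=rewrite | github.com/frigategnn/Mirage | ogbg-molhiv/data_utils.py | tree_class_ctr
-- ===== SOURCE A (Python) =====
-- def tree_class_ctr(classes, dataset):
--     tree_class_count = {}
--     for class_, graph in zip(classes, dataset):
--         for tree in graph:
--             if tree not in tree_class_count:
--                 tree_class_count[tree] = {}
--             if class_ not in tree_class_count[tree]:
--                 tree_class_count[tree][class_] = 0
--             tree_class_count[tree][class_] += 1
--     return tree_class_count
-- ===== SOURCE B (Python) =====
-- def tree_class_ctr(classes, dataset):
--     # Flat count of (tree, class) pairs, then regroup into the nested dict.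
--     flat = [(tree, class_) for class_, graph in zip(classes, dataset) for tree in graph]
--     pairs = {}
--     for key in flat:
--         pairs[key] = pairs.get(key, 0) + 1
--     result = {}
--     for (tree, class_), cnt in pairs.items():
--         result.setdefault(tree, {})[class_] = cnt
--     return result
-- ===== Notes on version B (the rewrite author's own statement) =====
-- stated objective: alternative
-- what changed: Instead of accumulating into the nested dict inline, B builds a flat counter over all (tree, class) pairs in one pass and then regroups the counter's items into the nested dict in a second pass.
import Mathlib
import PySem

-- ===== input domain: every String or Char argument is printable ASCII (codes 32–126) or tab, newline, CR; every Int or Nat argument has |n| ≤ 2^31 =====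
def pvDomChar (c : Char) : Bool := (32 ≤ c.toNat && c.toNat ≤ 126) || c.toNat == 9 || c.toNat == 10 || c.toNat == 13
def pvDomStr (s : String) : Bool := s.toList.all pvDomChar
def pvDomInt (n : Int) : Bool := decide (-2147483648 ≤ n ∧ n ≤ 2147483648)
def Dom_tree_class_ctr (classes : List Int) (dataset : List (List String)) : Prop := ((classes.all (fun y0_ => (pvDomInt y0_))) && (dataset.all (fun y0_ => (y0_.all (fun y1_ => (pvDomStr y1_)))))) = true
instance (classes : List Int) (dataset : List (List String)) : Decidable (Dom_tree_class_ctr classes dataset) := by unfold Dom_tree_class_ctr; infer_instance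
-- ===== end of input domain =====

-- B regroups a flat (tree, class) counter into the nested dict instead of accumulating it inline; same cost (objective: alternative).

-- ===== PORT A =====
-- the body of A's inner loop ('tree' iteration): the three nested-dict updates in order
def stepA (d : PySem.Dict String (PySem.Dict Int Int)) (class_ : Int) (tree : String) :
    PySem.Dict String (PySem.Dict Int Int) :=
  let d1 := if d.contains tree then d else d.insert tree PySem.Dict.empty
  let d2 := if (d1.getD tree PySem.Dict.empty).contains class_ then d1
            else d1.insert tree ((d1.getD tree PySem.Dict.empty).insert class_ 0)
  -- 'tree_class_count[tree][class_] += 1' (the key is present here, so getD's default is never used)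
  d2.insert tree ((d2.getD tree PySem.Dict.empty).insert class_
    ((d2.getD tree PySem.Dict.empty).getD class_ 0 + 1))

def tree_class_ctr (classes : List Int) (dataset : List (List String)) : List (String × List (Int × Int)) :=
  let d := (classes.zip dataset).foldl
    (fun d cg => cg.2.foldl (fun d tree => stepA d cg.1 tree) d) PySem.Dict.empty
  d.items.map (fun p => (p.1, p.2.items))

-- ===== PORT B =====
-- 'result.setdefault(tree, {})[class_] = cnt' for one counter item ((tree, class_), cnt)
def stepR (r : PySem.Dict String (PySem.Dict Int Int)) (q : (String × Int) × Int) :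
    PySem.Dict String (PySem.Dict Int Int) :=
  let r1 := r.setdefault q.1.1 PySem.Dict.empty
  r1.insert q.1.1 ((r1.getD q.1.1 PySem.Dict.empty).insert q.1.2 q.2)

def tree_class_ctr_alt (classes : List Int) (dataset : List (List String)) : List (String × List (Int × Int)) :=
  let flat := (classes.zip dataset).flatMap (fun cg => cg.2.map (fun tree => (tree, cg.1)))
  let pairs := flat.foldl (fun d k => d.insert k (d.getD k 0 + 1)) PySem.Dict.empty
  let result := pairs.items.foldl stepR PySem.Dict.empty
  result.items.map (fun p => (p.1, p.2.items))

-- ===== PRECONDITION & SPEC =====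
def Spec_tree_class_ctr (classes : List Int) (dataset : List (List String)) (out : List (String × List (Int × Int))) : Prop := out = tree_class_ctr_alt classes dataset
instance (classes : List Int) (dataset : List (List String)) (out : List (String × List (Int × Int))) : Decidable (Spec_tree_class_ctr classes dataset out) := by unfold Spec_tree_class_ctr; infer_instance

-- ===== CLAIM (what is proved, stated in full; the proofs are below) =====
def Claim_equal_tree_class_ctr : Prop := ∀ (classes : List Int) (dataset : List (List String)), Dom_tree_class_ctr classes dataset → Spec_tree_class_ctr classes dataset (tree_class_ctr classes dataset)

-- ===== LEMMAS AND PROOFS =====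

-- the classes paired with tree t, in order, in the flat (tree, class) pair list ps
def csF (ps : List (String × Int)) (t : String) : List Int :=
  (ps.filter (fun p => p.1 == t)).map (fun p => p.2)

theorem csF_append_singleton (ps : List (String × Int)) (p : String × Int) (t : String) :
    csF (ps ++ [p]) t = csF ps t ++ if p.1 = t then [p.2] else [] := by
  simp [csF, List.filter_append]
  split_ifs <;> simp_all

-- dedup-level list lemmas
theorem ofList_filter {α : Type} [BEq α] [LawfulBEq α] (l : List α) (q : α → Bool) :
    (PySem.Set.ofList l).filter q = PySem.Set.ofList (l.filter q) := by
  induction l using List.reverseRecOn with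
  | nil => rfl
  | append_singleton xs x ih =>
    rw [PySem.Set.ofList_append_singleton, List.filter_append]
    by_cases hq : q x
    · rw [show List.filter q [x] = [x] from by simp [hq], PySem.Set.ofList_append_singleton]
      by_cases hx : x ∈ xs
      · rw [PySem.Set.add_of_mem (by simpa [PySem.Set.mem_ofList] using hx), ih,
          PySem.Set.add_of_mem (by simp [PySem.Set.mem_ofList, List.mem_filter, hx, hq])]
      · rw [PySem.Set.add_of_not_mem (by simpa [PySem.Set.mem_ofList] using hx), List.filter_append,
          ih, show List.filter q [x] = [x] from by simp [hq],
          PySem.Set.add_of_not_mem (by simp [PySem.Set.mem_ofList, List.mem_filter, hx])]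
    · rw [show List.filter q [x] = ([] : List α) from by simp [hq], List.append_nil]
      by_cases hx : x ∈ xs
      · rw [PySem.Set.add_of_mem (by simpa [PySem.Set.mem_ofList] using hx), ih]
      · rw [PySem.Set.add_of_not_mem (by simpa [PySem.Set.mem_ofList] using hx), List.filter_append,
          show List.filter q [x] = ([] : List α) from by simp [hq], List.append_nil, ih]

theorem ofList_map_ofList {α β : Type} [BEq α] [LawfulBEq α] [BEq β] [LawfulBEq β]
    (l : List α) (f : α → β) :
    PySem.Set.ofList ((PySem.Set.ofList l).map f) = PySem.Set.ofList (l.map f) := by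
  induction l using List.reverseRecOn with
  | nil => rfl
  | append_singleton xs x ih =>
    rw [PySem.Set.ofList_append_singleton, List.map_append,
      show List.map f [x] = [f x] from rfl, PySem.Set.ofList_append_singleton, ← ih]
    by_cases hx : x ∈ xs
    · rw [PySem.Set.add_of_mem (by simpa [PySem.Set.mem_ofList] using hx),
        PySem.Set.add_of_mem (by simp only [PySem.Set.mem_ofList]; exact List.mem_map_of_mem (by simpa [PySem.Set.mem_ofList] using hx))]
    · rw [PySem.Set.add_of_not_mem (by simpa [PySem.Set.mem_ofList] using hx), List.map_append,
        show List.map f [x] = [f x] from rfl, PySem.Set.ofList_append_singleton]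

theorem count_csF (ps : List (String × Int)) (t : String) (c : Int) :
    ((csF ps t).count c : Int) = ps.count (t, c) := by
  induction ps with
  | nil => rfl
  | cons p ps ih =>
    by_cases h : p.1 = t
    · by_cases h2 : p.2 = c
      · have : p = (t, c) := by cases p; simp_all
        simp [csF, this, List.count_cons] at *
        omega
      · have : p ≠ (t, c) := by cases p; simp_all
        simp [csF, h, h2, List.count_cons, this] at *
        omega
    · have : p ≠ (t, c) := by cases p; simp_all
      simp [csF, h, List.count_cons, this] at *
      omega

-- ---- step lemmas for A's loop body ----
theorem stepA_keys (d : PySem.Dict String (PySem.Dict Int Int)) (c : Int) (t : String) :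
    (stepA d c t).keys = PySem.Set.add d.keys t := by
  unfold stepA
  by_cases ht : d.contains t = true
  · have hmem : t ∈ d.keys := (PySem.Dict.contains_iff_mem_keys d t).mp ht
    by_cases hc : (d.getD t PySem.Dict.empty).contains c = true
    · simp [ht, hc, PySem.Dict.keys_insert_of_contains, PySem.Set.add_eq_ite, hmem]
    · simp [ht, hc, PySem.Dict.keys_insert_of_contains, PySem.Dict.contains_insert,
        PySem.Set.add_eq_ite, hmem]
  · have hf : d.contains t = false := by simpa using ht
    have hmem : t ∉ d.keys := fun h => ht ((PySem.Dict.contains_iff_mem_keys d t).mpr h)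
    simp [ht, PySem.Dict.getD_insert_self, PySem.Dict.contains_empty,
      PySem.Dict.keys_insert_of_contains, PySem.Dict.contains_insert,
      PySem.Dict.keys_insert_of_not_contains d _ hf,
      PySem.Set.add_eq_ite, hmem]

theorem stepA_getD_ne (d : PySem.Dict String (PySem.Dict Int Int)) (c : Int) (t t' : String)
    (h : t' ≠ t) : (stepA d c t).getD t' PySem.Dict.empty = d.getD t' PySem.Dict.empty := by
  unfold stepA
  by_cases ht : d.contains t = true
  · by_cases hc : (d.getD t PySem.Dict.empty).contains c = true
    · simp [ht, hc, PySem.Dict.getD_insert_of_ne _ _ _ h]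
    · simp [ht, hc, PySem.Dict.getD_insert_of_ne _ _ _ h]
  · simp [ht, PySem.Dict.getD_insert_self, PySem.Dict.contains_empty,
      PySem.Dict.getD_insert_of_ne _ _ _ h]

theorem stepA_getD_self (d : PySem.Dict String (PySem.Dict Int Int)) (c : Int) (t : String) :
    (stepA d c t).getD t PySem.Dict.empty
      = (d.getD t PySem.Dict.empty).insert c ((d.getD t PySem.Dict.empty).getD c 0 + 1) := by
  unfold stepA
  by_cases ht : d.contains t = true
  · by_cases hc : (d.getD t PySem.Dict.empty).contains c = true
    · simp [ht, hc, PySem.Dict.getD_insert_self]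
    · simp [ht, hc, PySem.Dict.getD_insert_self, PySem.Dict.insert_insert_self,
        PySem.Dict.getD_of_not_contains _ _ (by simpa using hc)]
  · simp [ht, PySem.Dict.getD_insert_self, PySem.Dict.contains_empty,
      PySem.Dict.insert_insert_self, PySem.Dict.getD_of_not_contains d _ (by simpa using ht),
      PySem.Dict.getD_empty]

-- ---- step lemmas for B's regroup loop body ----
theorem stepR_keys (r : PySem.Dict String (PySem.Dict Int Int)) (q : (String × Int) × Int) :
    (stepR r q).keys = PySem.Set.add r.keys q.1.1 := by
  unfold stepR
  by_cases ht : r.contains q.1.1 = true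
  · have hmem : q.1.1 ∈ r.keys := (PySem.Dict.contains_iff_mem_keys r q.1.1).mp ht
    simp [PySem.Dict.setdefault_of_contains _ _ ht, PySem.Dict.keys_insert_of_contains r _ ht,
      PySem.Set.add_eq_ite, hmem]
  · have hmem : q.1.1 ∉ r.keys := fun h => ht ((PySem.Dict.contains_iff_mem_keys r q.1.1).mpr h)
    simp [PySem.Dict.setdefault_of_not_contains _ _ (by simpa using ht),
      PySem.Dict.keys_insert_of_contains, PySem.Dict.contains_insert,
      PySem.Dict.keys_insert_of_not_contains r _ (by simpa using ht),
      PySem.Set.add_eq_ite, hmem]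

theorem stepR_getD_ne (r : PySem.Dict String (PySem.Dict Int Int)) (q : (String × Int) × Int)
    (t' : String) (h : t' ≠ q.1.1) :
    (stepR r q).getD t' PySem.Dict.empty = r.getD t' PySem.Dict.empty := by
  unfold stepR
  by_cases ht : r.contains q.1.1 = true
  · simp [PySem.Dict.setdefault_of_contains _ _ ht, PySem.Dict.getD_insert_of_ne _ _ _ h]
  · simp [PySem.Dict.setdefault_of_not_contains _ _ (by simpa using ht),
      PySem.Dict.getD_insert_of_ne _ _ _ h]

theorem stepR_getD_self (r : PySem.Dict String (PySem.Dict Int Int)) (q : (String × Int) × Int) :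
    (stepR r q).getD q.1.1 PySem.Dict.empty
      = (r.getD q.1.1 PySem.Dict.empty).insert q.1.2 q.2 := by
  unfold stepR
  by_cases ht : r.contains q.1.1 = true
  · simp [PySem.Dict.setdefault_of_contains _ _ ht, PySem.Dict.getD_insert_self]
  · simp [PySem.Dict.setdefault_of_not_contains _ _ (by simpa using ht),
      PySem.Dict.getD_insert_self, PySem.Dict.insert_insert_self,
      PySem.Dict.getD_of_not_contains r _ (by simpa using ht), PySem.Dict.getD_empty]

-- ---- characterisation of A's accumulation over the flat pair list ----
def accA (ps : List (String × Int)) : PySem.Dict String (PySem.Dict Int Int) :=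
  ps.foldl (fun d p => stepA d p.2 p.1) PySem.Dict.empty

theorem dkeys_insert {κ ν : Type} [BEq κ] [LawfulBEq κ] (d : PySem.Dict κ ν) (k : κ) (v : ν) :
    (d.insert k v).keys = PySem.Set.add d.keys k := by
  by_cases h : d.contains k = true
  · rw [PySem.Dict.keys_insert_of_contains d v h, PySem.Set.add_eq_ite,
      if_pos ((PySem.Dict.contains_iff_mem_keys d k).mp h)]
  · rw [PySem.Dict.keys_insert_of_not_contains d v (by simpa using h), PySem.Set.add_eq_ite,
      if_neg (fun hm => h ((PySem.Dict.contains_iff_mem_keys d k).mpr hm))]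

theorem accA_char (ps : List (String × Int)) :
    (accA ps).keys = PySem.Set.ofList (ps.map (fun p => p.1))
    ∧ (∀ t, ((accA ps).getD t PySem.Dict.empty).keys = PySem.Set.ofList (csF ps t))
    ∧ (∀ t c, ((accA ps).getD t PySem.Dict.empty).getD c 0 = ((csF ps t).count c : Int)) := by
  induction ps using List.reverseRecOn with
  | nil =>
    refine ⟨rfl, fun t => ?_, fun t c => ?_⟩ <;>
      simp [accA, csF, PySem.Dict.getD_empty, PySem.Dict.keys_empty, PySem.Set.ofList]
  | append_singleton ps p ih =>
    obtain ⟨ih1, ih2, ih3⟩ := ih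
    have hstep : accA (ps ++ [p]) = stepA (accA ps) p.2 p.1 := by
      simp [accA, List.foldl_append]
    refine ⟨?_, fun t => ?_, fun t c => ?_⟩
    · rw [hstep, stepA_keys, ih1, List.map_append,
        show List.map (fun p => p.1) [p] = [p.1] from rfl, PySem.Set.ofList_append_singleton]
    · rw [hstep, csF_append_singleton]
      by_cases h : t = p.1
      · subst h
        rw [stepA_getD_self, dkeys_insert, ih2, if_pos rfl, PySem.Set.ofList_append_singleton]
      · rw [stepA_getD_ne _ _ _ _ h, ih2, if_neg (fun he => h he.symm), List.append_nil]
    · rw [hstep, csF_append_singleton]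
      by_cases h : t = p.1
      · subst h
        rw [stepA_getD_self, if_pos rfl, PySem.Dict.getD_insert]
        by_cases hc : c = p.2
        · subst hc
          rw [if_pos rfl, ih3, List.count_append]
          simp
        · rw [if_neg hc, ih3, List.count_append]
          have h0 : List.count c [p.2] = 0 := List.count_eq_zero.mpr (by simpa using hc)
          rw [h0, Nat.add_zero]
      · rw [stepA_getD_ne _ _ _ _ h, if_neg (fun he => h he.symm), List.append_nil, ih3]

-- ---- characterisation of B's regroup of a keyed list ----
def accB (q : List (String × Int)) (v : String × Int → Int) : PySem.Dict String (PySem.Dict Int Int) :=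
  (q.map (fun k => (k, v k))).foldl stepR PySem.Dict.empty

theorem accB_char (q : List (String × Int)) (v : String × Int → Int) (hnd : q.Nodup) :
    (accB q v).keys = PySem.Set.ofList (q.map (fun p => p.1))
    ∧ (∀ t, ((accB q v).getD t PySem.Dict.empty).keys
          = PySem.Set.ofList ((q.filter (fun p => p.1 == t)).map (fun p => p.2)))
    ∧ (∀ t c, ((accB q v).getD t PySem.Dict.empty).getD c 0
          = if (t, c) ∈ q then v (t, c) else 0) := by
  induction q using List.reverseRecOn with
  | nil =>
    refine ⟨rfl, fun t => ?_, fun t c => ?_⟩ <;>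
      simp [accB, PySem.Dict.getD_empty, PySem.Dict.keys_empty, PySem.Set.ofList]
  | append_singleton q p ih =>
    have hq : q.Nodup := hnd.of_append_left
    have hp : p ∉ q := by
      intro hm
      exact (List.disjoint_of_nodup_append hnd) hm (List.mem_singleton_self p)
    obtain ⟨ih1, ih2, ih3⟩ := ih hq
    have hstep : accB (q ++ [p]) v = stepR (accB q v) (p, v p) := by
      simp [accB, List.foldl_append]
    refine ⟨?_, fun t => ?_, fun t c => ?_⟩
    · rw [hstep, stepR_keys, ih1, List.map_append,
        show List.map (fun p => p.1) [p] = [p.1] from rfl, PySem.Set.ofList_append_singleton]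
    · rw [hstep, List.filter_append]
      by_cases h : t = p.1
      · subst h
        rw [stepR_getD_self, dkeys_insert, ih2,
          show List.filter (fun q => q.1 == p.1) [p] = [p] from by simp,
          List.map_append, show List.map (fun p => p.2) [p] = [p.2] from rfl,
          PySem.Set.ofList_append_singleton]
      · rw [stepR_getD_ne _ _ _ (by simpa using h), ih2,
          show List.filter (fun q => q.1 == t) [p] = [] from by
            have hb : (p.1 == t) = false := by
              simp only [beq_eq_false_iff_ne, ne_eq]
              exact fun he => h he.symm
            simp [List.filter, hb],
          List.append_nil]
    · by_cases h : t = p.1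
      · subst h
        rw [hstep, stepR_getD_self, PySem.Dict.getD_insert]
        by_cases hc : c = p.2
        · subst hc
          rw [if_pos rfl, if_pos (by simp)]
        · rw [if_neg hc, ih3]
          have hne : (p.1, c) ≠ p := fun he => hc (congrArg Prod.snd he)
          by_cases hm : (p.1, c) ∈ q
          · rw [if_pos hm, if_pos (List.mem_append_left _ hm)]
          · rw [if_neg hm, if_neg (by
              intro hmm
              rcases List.mem_append.mp hmm with h1 | h1
              · exact hm h1
              · exact hne (List.mem_singleton.mp h1))]
      · rw [hstep, stepR_getD_ne _ _ _ (by simpa using h), ih3]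
        have hne : (t, c) ≠ p := fun he => h (congrArg Prod.fst he)
        simp [hne]

theorem dict_eq_of_keys_getD {κ ν : Type} [BEq κ] [LawfulBEq κ]
    (d d' : PySem.Dict κ ν) (dflt : ν) (hnd : d.keys.Nodup) (hk : d.keys = d'.keys)
    (h : ∀ k, d.getD k dflt = d'.getD k dflt) : d = d' := by
  apply PySem.Dict.ext
  rw [PySem.Dict.items_eq_map_keys d hnd dflt, PySem.Dict.items_eq_map_keys d' (hk ▸ hnd) dflt, ← hk]
  exact List.map_congr_left (fun k _ => by rw [h k])

-- ===== VERDICT (by name: the statement is the Claim_ definition above) =====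
theorem foldzip_eq_accA (l : List (Int × List String))
    (init : PySem.Dict String (PySem.Dict Int Int)) :
    l.foldl (fun d cg => cg.2.foldl (fun d tree => stepA d cg.1 tree) d) init
      = (l.flatMap (fun cg => cg.2.map (fun tree => (tree, cg.1)))).foldl
          (fun d p => stepA d p.2 p.1) init := by
  induction l generalizing init with
  | nil => rfl
  | cons cg l ih =>
    rw [List.foldl_cons, List.flatMap_cons, List.foldl_append, ih, List.foldl_map]

theorem acc_eq (ps : List (String × Int)) :
    accA ps = accB (PySem.Set.ofList ps) (fun k => (ps.count k : Int)) := by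
  obtain ⟨a1, a2, a3⟩ := accA_char ps
  obtain ⟨b1, b2, b3⟩ := accB_char (PySem.Set.ofList ps) (fun k => (ps.count k : Int))
    (PySem.Set.nodup_ofList ps)
  refine dict_eq_of_keys_getD _ _ PySem.Dict.empty ?_ ?_ ?_
  · rw [a1]; exact PySem.Set.nodup_ofList _
  · rw [a1, b1, ofList_map_ofList]
  · intro t
    refine dict_eq_of_keys_getD _ _ 0 ?_ ?_ ?_
    · rw [a2]; exact PySem.Set.nodup_ofList _
    · rw [a2, b2, ofList_filter, ofList_map_ofList]
      rfl
    · intro c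
      rw [a3, b3, count_csF]
      by_cases hm : (t, c) ∈ ps
      · rw [if_pos ((PySem.Set.mem_ofList _ _).mpr hm)]
      · rw [if_neg (fun hmm => hm ((PySem.Set.mem_ofList _ _).mp hmm)),
          List.count_eq_zero.mpr hm, Int.natCast_zero]

-- ===== VERDICT =====
theorem tree_class_ctr_spec : Claim_equal_tree_class_ctr := by
  intro classes dataset _
  show tree_class_ctr classes dataset = tree_class_ctr_alt classes dataset
  simp only [tree_class_ctr, tree_class_ctr_alt]
  rw [foldzip_eq_accA, PySem.Dict.foldl_insert_getD_add_one_eq_counter, PySem.Dict.items_counter]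
  exact congrArg
    (fun d : PySem.Dict String (PySem.Dict Int Int) => d.items.map (fun p => (p.1, p.2.items)))
    (acc_eq _)
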